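-- pv_equiv track=rewrite | github.com/Rafmormor3/Programacion | funciones/funciones/programacion_modular_1.py | sustituirUltimo
-- ===== SOURCE A (Python) =====
-- def sustituirUltimo(lista,numero,sustituto):
--     lista.reverse()
--     contador=0
--     for i in range(len(lista)):
--         if lista[i]==numero:
--             while contador!=1:
--                 contador+=1
--                 lista[i]=sustituto
--     lista.reverse()
--     return lista
-- ===== SOURCE B (Python) =====
-- def sustituirUltimo(lista, numero, sustituto):
--     last = -1
--     for i, x in enumerate(lista):
--         if x == numero:
--             last = i
--     if last >= 0:
--         lista[last] = sustituto
--     return lista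
-- ===== Notes on version B (the rewrite author's own statement) =====
-- stated objective: simpler
-- what changed: B replaces the double in-place reverse plus a flagged index loop with a single forward enumerate pass that records the last matching index, followed by one conditional assignment.
import Mathlib
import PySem

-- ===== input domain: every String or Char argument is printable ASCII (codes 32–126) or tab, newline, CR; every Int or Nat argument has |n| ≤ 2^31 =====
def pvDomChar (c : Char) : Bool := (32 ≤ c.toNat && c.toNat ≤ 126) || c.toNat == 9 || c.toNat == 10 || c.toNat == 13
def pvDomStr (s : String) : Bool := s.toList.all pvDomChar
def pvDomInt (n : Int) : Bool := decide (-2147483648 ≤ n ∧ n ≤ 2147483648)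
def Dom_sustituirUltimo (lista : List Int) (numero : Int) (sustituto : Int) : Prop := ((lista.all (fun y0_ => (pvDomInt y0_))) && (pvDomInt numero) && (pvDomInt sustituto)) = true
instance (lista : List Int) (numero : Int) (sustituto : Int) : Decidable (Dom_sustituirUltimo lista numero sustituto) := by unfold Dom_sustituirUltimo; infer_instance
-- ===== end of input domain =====

-- B replaces A's double in-place reverse plus flagged index loop by one forward
-- enumerate pass recording the last matching index, then a single assignment.
-- Both Pythons mutate `lista` in place and return it; the equivalence proved here
-- is about the RETURN value.

-- ===== PORT A =====
-- literal transliteration: reverse; for i in range(len): if lista[i]==numero: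
-- while contador!=1: contador+=1; lista[i]=sustituto; reverse again.
-- The inner `while` is ported as one conditional step: contador is 0 or 1 at
-- every entry of the loop in this program, so the while body runs at most once
-- (exact here). lista[i] with i ∈ range(len) is in range, ported as getD.
def sustituirUltimo (lista : List Int) (numero : Int) (sustituto : Int) : List Int :=
  let l0 := lista.reverse
  let st := (List.range l0.length).foldl
    (fun (st : List Int × Int) i =>
      if st.1.getD i 0 = numero then
        if st.2 ≠ 1 then (st.1.set i sustituto, st.2 + 1) else st
      else st)
    (l0, 0)
  st.1.reverse

-- ===== PORT B =====
def sustituirUltimo_alt (lista : List Int) (numero : Int) (sustituto : Int) : List Int :=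
  let last := (PySem.List.enumerate lista 0).foldl
    (fun (last : Int) p => if p.2 = numero then p.1 else last) (-1)
  if last ≥ 0 then lista.set last.toNat sustituto else lista

-- ===== PRECONDITION & SPEC =====
def Spec_sustituirUltimo (lista : List Int) (numero : Int) (sustituto : Int) (out : List Int) : Prop := out = sustituirUltimo_alt lista numero sustituto
instance (lista : List Int) (numero : Int) (sustituto : Int) (out : List Int) : Decidable (Spec_sustituirUltimo lista numero sustituto out) := by unfold Spec_sustituirUltimo; infer_instance

-- ===== CLAIM (what is proved, stated in full; the proofs are below) =====
def Claim_equal_sustituirUltimo : Prop := ∀ (lista : List Int) (numero : Int) (sustituto : Int), Dom_sustituirUltimo lista numero sustituto → Spec_sustituirUltimo lista numero sustituto (sustituirUltimo lista numero sustituto)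

-- ===== LEMMAS AND PROOFS =====

-- index of the LAST occurrence of n in l (none if absent)
def lastIdx (n : Int) : List Int → Option Nat
  | [] => none
  | x :: xs =>
    match lastIdx n xs with
    | some j => some (j + 1)
    | none => if x = n then some 0 else none

-- index of the FIRST occurrence of n in l (none if absent)
def firstIdx (n : Int) : List Int → Option Nat
  | [] => none
  | x :: xs => if x = n then some 0 else (firstIdx n xs).map (· + 1)

theorem firstIdx_append (n : Int) (a b : List Int) :
    firstIdx n (a ++ b) =
      match firstIdx n a with
      | some j => some j
      | none => (firstIdx n b).map (· + a.length) := by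
  induction a with
  | nil => simp [firstIdx]
  | cons x xs ih =>
    simp only [List.cons_append, firstIdx, ih]
    by_cases hx : x = n
    · simp [hx]
    · simp only [if_neg hx]
      cases firstIdx n xs with
      | some j => simp
      | none =>
        cases firstIdx n b with
        | some j =>
          show some (j + xs.length + 1) = some (j + (xs.length + 1))
          exact congrArg some (by omega)
        | none => simp

theorem lastIdx_lt (n : Int) (l : List Int) (j : Nat) (h : lastIdx n l = some j) :
    j < l.length := by
  induction l generalizing j with
  | nil => simp [lastIdx] at h
  | cons x xs ih =>
    simp only [lastIdx] at h
    cases hx : lastIdx n xs with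
    | some j' =>
      rw [hx] at h
      have := ih j' hx
      simp at h
      simp [List.length_cons]; omega
    | none =>
      rw [hx] at h
      by_cases hxe : x = n
      · simp [hxe] at h; simp [← h]
      · simp [hxe] at h

-- first occurrence in the reverse = mirrored last occurrence
theorem firstIdx_reverse (n : Int) (l : List Int) :
    firstIdx n l.reverse = (lastIdx n l).map (fun j => l.length - 1 - j) := by
  induction l with
  | nil => simp [firstIdx, lastIdx]
  | cons x xs ih =>
    simp only [List.reverse_cons, firstIdx_append, ih, lastIdx]
    cases h : lastIdx n xs with
    | some j =>
      have hj := lastIdx_lt n xs j h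
      simp only [Option.map_some]
      simp [List.length_cons]
      omega
    | none =>
      simp only [Option.map_none]
      by_cases hx : x = n
      · simp [firstIdx, hx, List.length_reverse, List.length_cons]
      · simp [firstIdx, hx]

theorem foldA_inv (numero sustituto : Int) (l0 : List Int) (k : Nat) (hk : k ≤ l0.length) :
    (List.range k).foldl
      (fun (st : List Int × Int) i =>
        if st.1.getD i 0 = numero then
          if st.2 ≠ 1 then (st.1.set i sustituto, st.2 + 1) else st
        else st)
      (l0, 0) =
      match firstIdx numero (l0.take k) with
      | some j => (l0.set j sustituto, 1)
      | none => (l0, 0) := by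
  induction k with
  | zero => simp [firstIdx]
  | succ k ih =>
    have hk' : k ≤ l0.length := by omega
    have hklt : k < l0.length := by omega
    rw [List.range_succ, List.foldl_append, ih hk']
    have htake : l0.take (k+1) = l0.take k ++ [l0[k]] :=
      List.take_succ_eq_append_getElem hklt
    rw [htake, firstIdx_append]
    cases hf : firstIdx numero (l0.take k) with
    | some j =>
      -- flag already 1: the step is a no-op whatever the element is
      simp only [List.foldl_cons, List.foldl_nil]
      by_cases hc : (l0.set j sustituto).getD k 0 = numero <;> simp
    | none =>
      simp only [List.foldl_cons, List.foldl_nil]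
      have hget : l0[k]? = some l0[k] := List.getElem?_eq_getElem hklt
      by_cases hc : l0[k] = numero
      · simp [List.getD, hget, hc, firstIdx, List.length_take, Nat.min_eq_left hk']
      · simp [List.getD, hget, hc, firstIdx]

-- characterisation of port A
theorem sustituirUltimo_eq (lista : List Int) (numero sustituto : Int) :
    sustituirUltimo lista numero sustituto =
      match firstIdx numero lista.reverse with
      | some j => (lista.reverse.set j sustituto).reverse
      | none => lista := by
  unfold sustituirUltimo
  have h := foldA_inv numero sustituto lista.reverse lista.reverse.length (le_refl _)
  rw [List.take_length] at h
  simp only [h]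
  cases firstIdx numero lista.reverse with
  | some j => simp
  | none => simp

-- characterisation of B's enumerate fold
theorem foldB_eq (numero : Int) (xs : List Int) (s0 acc : Int) :
    (PySem.List.enumerate xs s0).foldl
      (fun (last : Int) p => if p.2 = numero then p.1 else last) acc =
      match lastIdx numero xs with
      | some j => s0 + (j : Int)
      | none => acc := by
  induction xs generalizing s0 acc with
  | nil => simp [PySem.List.enumerate_nil, lastIdx]
  | cons x xs ih =>
    rw [PySem.List.enumerate_cons]
    simp only [List.foldl_cons, lastIdx]
    rw [ih]
    cases lastIdx numero xs with
    | some j =>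
      simp only
      push_cast
      ring_nf
    | none =>
      by_cases hx : x = numero <;> simp [hx]

theorem sustituirUltimo_alt_eq (lista : List Int) (numero sustituto : Int) :
    sustituirUltimo_alt lista numero sustituto =
      match lastIdx numero lista with
      | some j => lista.set j sustituto
      | none => lista := by
  unfold sustituirUltimo_alt
  rw [foldB_eq]
  cases h : lastIdx numero lista with
  | some j => simp
  | none => norm_num

-- mirrored set commutes with reverse
theorem reverse_set (l : List Int) (j : Nat) (s : Int) (hj : j < l.length) :
    (l.set j s).reverse = l.reverse.set (l.length - 1 - j) s := by
  apply List.ext_getElem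
  · simp
  · intro i h1 h2
    simp only [List.getElem_reverse, List.getElem_set, List.length_set] at *
    have hi : i < l.length := by simpa using h1
    by_cases he : l.length - 1 - j = i
    · simp [he, show l.length - 1 - i = j by omega]
    · rw [if_neg he, if_neg (by omega)]

-- ===== VERDICT (by name: the statement is the Claim_ definition above) =====
theorem sustituirUltimo_spec : Claim_equal_sustituirUltimo := by
  intro lista numero sustituto _
  unfold Spec_sustituirUltimo
  rw [sustituirUltimo_eq, sustituirUltimo_alt_eq, firstIdx_reverse]
  cases h : lastIdx numero lista with
  | none => simp
  | some j =>
    have hj := lastIdx_lt numero lista j h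
    simp only [Option.map_some]
    rw [reverse_set _ _ _ (by simp; omega)]
    simp only [List.length_reverse, List.reverse_reverse]
    congr 1
    omega
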